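-- pv_equiv track=rewrite | github.com/Manan007224/street-coding | random/ease_array.py | ease_array
-- ===== SOURCE A (Python) =====
-- def ease_array(nums):
-- 	ll = len(nums)
--
-- 	for k in range(ll-1):
-- 		if nums[k+1]!=0 and nums[k]==nums[k+1]:
-- 			nums[k]=nums[k]*2
-- 			nums[k+1]=0
--
-- 	i,j = 0, 0
-- 	for k in range(ll):
-- 		if nums[k]==0:
-- 			j+=1
-- 		else:
-- 			nums[i]=nums[j]
-- 			j+=1
-- 			i+=1
--
-- 	while(i<ll):
-- 		nums[i]=0
-- 		i+=1
--
-- 	return nums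
-- ===== SOURCE B (Python) =====
-- def ease_array(nums):
--     ll = len(nums)
--     res = []
--     k = 0
--     while k < ll:
--         x = nums[k]
--         if x == 0:
--             k += 1
--         elif k + 1 < ll and nums[k + 1] == x:
--             res.append(2 * x)
--             k += 2
--         else:
--             res.append(x)
--             k += 1
--     res.extend([0] * (ll - len(res)))
--     for idx in range(ll):
--         nums[idx] = res[idx]
--     return nums
-- ===== Notes on version B (the rewrite author's own statement) =====
-- stated objective: alternative
-- what changed: Replaces A's three in-place passes (adjacent-merge with zero writes, stable compaction, zero-fill tail) by a single forward scan with one-element lookahead that builds the compacted merged output directly, advancing by 2 on a merge, then pads and writes back.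
import Mathlib
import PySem

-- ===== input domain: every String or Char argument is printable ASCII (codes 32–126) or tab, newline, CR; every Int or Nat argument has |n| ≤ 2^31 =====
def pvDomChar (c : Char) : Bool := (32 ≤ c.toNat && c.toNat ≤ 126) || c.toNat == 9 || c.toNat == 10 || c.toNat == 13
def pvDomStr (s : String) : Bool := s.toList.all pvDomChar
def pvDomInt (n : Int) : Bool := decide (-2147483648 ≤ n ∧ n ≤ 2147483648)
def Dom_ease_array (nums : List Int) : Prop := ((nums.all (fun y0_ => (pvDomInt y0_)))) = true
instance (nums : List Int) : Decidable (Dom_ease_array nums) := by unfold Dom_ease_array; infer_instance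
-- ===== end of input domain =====

-- B replaces A's three in-place passes (adjacent merge, stable compaction, zero-fill) by one
-- forward scan with lookahead that builds the compacted output directly, then pads and writes back.
-- Both Pythons mutate `nums` in place identically and return it; the theorems are about the value.

-- ===== PORT A =====
-- All index reads/writes of A are within range (k drawn from range(len)), so `getD _ 0` / `set`
-- are exact renderings of Python's nums[k] / nums[k]=v here.

-- the trailing `while i < ll: nums[i]=0; i+=1` loop of A
def fillZerosA (l : List Int) (i ll : Nat) : List Int :=
  if i < ll then fillZerosA (l.set i 0) (i + 1) ll else l
termination_by ll - i

def ease_array (nums : List Int) : List Int :=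
  let ll := nums.length
  -- first pass: for k in range(ll-1): merge equal nonzero neighbours in place
  let n1 := (List.range (ll - 1)).foldl (fun l k =>
      if l.getD (k + 1) 0 ≠ 0 ∧ l.getD k 0 = l.getD (k + 1) 0 then
        (l.set k (l.getD k 0 * 2)).set (k + 1) 0
      else l) nums
  -- second pass: for k in range(ll): shift nonzeros left, state (nums, i, j)
  let s := (List.range ll).foldl (fun (s : List Int × Nat × Nat) k =>
      if s.1.getD k 0 = 0 then (s.1, s.2.1, s.2.2 + 1)
      else (s.1.set s.2.1 (s.1.getD s.2.2 0), s.2.1 + 1, s.2.2 + 1)) (n1, 0, 0)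
  fillZerosA s.1 s.2.1 ll

-- ===== PORT B =====
-- the `while k < ll` scan of Source B: builds `res` front to back, advancing by 2 on a merge
def altLoop (nums : List Int) (ll k : Nat) : List Int :=
  if k < ll then
    let x := nums.getD k 0
    if x = 0 then altLoop nums ll (k + 1)
    else if k + 1 < ll ∧ nums.getD (k + 1) 0 = x then
      2 * x :: altLoop nums ll (k + 2)
    else x :: altLoop nums ll (k + 1)
  else []
termination_by ll - k

def ease_array_alt (nums : List Int) : List Int :=
  let ll := nums.length
  let res := altLoop nums ll 0
  let res2 := res ++ List.replicate (ll - res.length) 0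
  -- for idx in range(ll): nums[idx] = res[idx]
  (List.range ll).foldl (fun l idx => l.set idx (res2.getD idx 0)) nums

-- ===== PRECONDITION & SPEC =====
def Spec_ease_array (nums : List Int) (out : List Int) : Prop := out = ease_array_alt nums
instance (nums : List Int) (out : List Int) : Decidable (Spec_ease_array nums out) := by unfold Spec_ease_array; infer_instance

-- ===== CLAIM (what is proved, stated in full; the proofs are below) =====
def Claim_equal_ease_array : Prop := ∀ (nums : List Int), Dom_ease_array nums → Spec_ease_array nums (ease_array nums)

-- ===== LEMMAS AND PROOFS =====

-- the result of A's first pass, described structurally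
def specA : List Int → List Int
  | x :: y :: t => if y ≠ 0 ∧ x = y then x * 2 :: specA (0 :: t) else x :: specA (y :: t)
  | l => l
termination_by l => l.length

-- the merged nonzero values, the common functional core both programs compute
def nzMerge : List Int → List Int
  | [] => []
  | [x] => if x = 0 then [] else [x]
  | x :: y :: t =>
    if x = 0 then nzMerge (y :: t)
    else if y = x then 2 * x :: nzMerge t
    else x :: nzMerge (y :: t)

theorem specA_length (l : List Int) : (specA l).length = l.length := by
  induction l using specA.induct with
  | case1 x y t h ih => simp [specA, h, ih]
  | case2 x y t h ih => simp [specA, h, ih]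
  | case3 l h => simp [specA]

theorem nzMerge_zero_cons (t : List Int) : nzMerge (0 :: t) = nzMerge t := by
  cases t <;> simp [nzMerge]

theorem filter_specA (l : List Int) :
    (specA l).filter (fun a => a != 0) = nzMerge l := by
  induction l using specA.induct with
  | case1 x y t h ih =>
    obtain ⟨hy, hxy⟩ := h
    subst hxy
    have hx2 : x * 2 ≠ 0 := by exact mul_ne_zero hy (by norm_num)
    simp [specA, hy, hx2, ih, nzMerge_zero_cons, nzMerge, mul_comm]
  | case2 x y t h ih =>
    by_cases hx : x = 0
    · subst hx
      simp [specA, h, ih, nzMerge_zero_cons]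
    · have hyx : y ≠ x := by
        intro he; subst he; exact h ⟨hx, rfl⟩
      simp [specA, h, hx, ih, nzMerge, hyx]
  | case3 l h =>
    cases l with
    | nil => simp [specA, nzMerge]
    | cons x t =>
      cases t with
      | nil => by_cases hx : x = 0 <;> simp [specA, nzMerge, hx]
      | cons y t' => exact absurd rfl (fun he => h x y t' he)

theorem nzMerge_length_le (l : List Int) : (nzMerge l).length ≤ l.length := by
  induction l using nzMerge.induct with
  | case1 => simp [nzMerge]
  | case2 => simp [nzMerge]
  | case3 x hx => simp [nzMerge, hx]
  | case4 y t ih => simpa [nzMerge] using Nat.le_succ_of_le ih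
  | case5 y t hy ih => simp [nzMerge, hy]; omega
  | case6 x y t hx hyx ih => simpa [nzMerge, hx, hyx] using ih

-- named copies of the fold bodies of the two ports, for stating the loop lemmas
def step1 : List Int → Nat → List Int := fun l k =>
  if l.getD (k + 1) 0 ≠ 0 ∧ l.getD k 0 = l.getD (k + 1) 0 then
    (l.set k (l.getD k 0 * 2)).set (k + 1) 0
  else l

def step2 : List Int × Nat × Nat → Nat → List Int × Nat × Nat := fun s k =>
  if s.1.getD k 0 = 0 then (s.1, s.2.1, s.2.2 + 1)
  else (s.1.set s.2.1 (s.1.getD s.2.2 0), s.2.1 + 1, s.2.2 + 1)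

-- A's first pass equals specA
theorem pass1_eq (active : List Int) : ∀ (done : List Int),
    (List.range' done.length (active.length - 1)).foldl step1 (done ++ active)
      = done ++ specA active := by
  induction active using specA.induct with
  | case1 x y t h ih =>
    intro done
    obtain ⟨hy, hxy⟩ := h
    have hlen : (x :: y :: t).length - 1 = t.length + 1 := by simp
    rw [hlen, List.range'_succ, List.foldl_cons]
    have hg0 : (done ++ x :: y :: t).getD done.length 0 = x := by
      rw [List.getD_append_right _ _ _ _ le_rfl]
      simp
    have hg1 : (done ++ x :: y :: t).getD (done.length + 1) 0 = y := by
      rw [List.getD_append_right _ _ _ _ (by omega)]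
      have h1 : done.length + 1 - done.length = 1 := by omega
      rw [h1]
      simp [List.getD]
    have hstep : step1 (done ++ x :: y :: t) done.length = (done ++ [x * 2]) ++ 0 :: t := by
      unfold step1
      rw [hg0, hg1, if_pos ⟨hy, hxy⟩,
        List.set_append, if_neg (by omega), Nat.sub_self,
        List.set_append, if_neg (by omega)]
      have h2 : done.length + 1 - done.length = 1 := by omega
      rw [h2]
      simp
    rw [hstep]
    have hst : done.length + 1 = (done ++ [x * 2]).length := by simp
    rw [hst]
    have h3 := ih (done ++ [x * 2])
    simp only [List.length_cons, Nat.add_sub_cancel] at h3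
    rw [h3, specA, if_pos ⟨hy, hxy⟩, List.append_assoc]
    simp
  | case2 x y t h ih =>
    intro done
    have hlen : (x :: y :: t).length - 1 = t.length + 1 := by simp
    rw [hlen, List.range'_succ, List.foldl_cons]
    have hg0 : (done ++ x :: y :: t).getD done.length 0 = x := by
      rw [List.getD_append_right _ _ _ _ le_rfl]
      simp
    have hg1 : (done ++ x :: y :: t).getD (done.length + 1) 0 = y := by
      rw [List.getD_append_right _ _ _ _ (by omega)]
      have h1 : done.length + 1 - done.length = 1 := by omega
      rw [h1]
      simp [List.getD]
    have hstep : step1 (done ++ x :: y :: t) done.length = (done ++ [x]) ++ y :: t := by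
      unfold step1
      rw [hg0, hg1, if_neg h]
      simp
    rw [hstep]
    have hst : done.length + 1 = (done ++ [x]).length := by simp
    rw [hst]
    have h3 := ih (done ++ [x])
    simp only [List.length_cons, Nat.add_sub_cancel] at h3
    rw [h3, specA, if_neg h, List.append_assoc]
    simp
  | case3 l h =>
    intro done
    cases l with
    | nil => simp [specA]
    | cons x t =>
      cases t with
      | nil => simp [specA]
      | cons y t' => exact absurd rfl (fun he => h x y t' he)

-- A's compaction pass invariant
theorem pass2_inv (orig : List Int) (m : Nat) :
    ∀ (k : Nat) (l : List Int) (i : Nat), k + m = orig.length → l.length = orig.length →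
    i ≤ k → l.take i = (orig.take k).filter (fun a => a != 0) → l.drop k = orig.drop k →
    ((List.range' k m).foldl step2 (l, i, k)).1.length = orig.length ∧
    ((List.range' k m).foldl step2 (l, i, k)).2.1 ≤ orig.length ∧
    ((List.range' k m).foldl step2 (l, i, k)).1.take
        (((List.range' k m).foldl step2 (l, i, k)).2.1)
      = orig.filter (fun a => a != 0) := by
  induction m with
  | zero =>
    intro k l i hkm hlen hik htake hdrop
    simp only [List.range'_zero, List.foldl_nil]
    have hk : k = orig.length := by omega
    refine ⟨hlen, by omega, ?_⟩
    rw [htake, hk, List.take_of_length_le le_rfl]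
  | succ m ih =>
    intro k l i hkm hlen hik htake hdrop
    have hklt : k < orig.length := by omega
    have hkl : k < l.length := by omega
    have hcons : l[k] :: l.drop (k + 1) = orig[k] :: orig.drop (k + 1) := by
      rw [← List.drop_eq_getElem_cons hkl, hdrop, List.drop_eq_getElem_cons hklt]
    have hlk : l[k] = orig[k] := by injection hcons
    have hdt : l.drop (k + 1) = orig.drop (k + 1) := by injection hcons
    have hgdk : l.getD k 0 = l[k] := List.getD_eq_getElem l 0 hkl
    have htk1 : orig.take (k + 1) = orig.take k ++ [orig[k]] := by
      rw [List.take_add_one]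
      simp [List.getElem?_eq_getElem hklt]
    rw [List.range'_succ, List.foldl_cons]
    by_cases hz : l.getD k 0 = 0
    · have hstep : step2 (l, i, k) k = (l, i, k + 1) := by
        unfold step2
        rw [if_pos hz]
      rw [hstep]
      apply ih (k + 1) l i (by omega) hlen (by omega) ?_ hdt
      have hok : orig[k] = (0 : Int) := by rw [← hlk, ← hgdk]; exact hz
      rw [htk1, List.filter_append, hok]
      simp [htake]
    · have hstep : step2 (l, i, k) k = (l.set i (l.getD k 0), i + 1, k + 1) := by
        unfold step2
        rw [if_neg hz]
      rw [hstep]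
      have hvo : l.getD k 0 = orig[k] := by rw [hgdk, hlk]
      have hil : i < l.length := by omega
      apply ih (k + 1) _ (i + 1) (by omega) (by simp [hlen]) (by omega) ?_ ?_
      · have hset : l.set i (l.getD k 0) = l.take i ++ l.getD k 0 :: l.drop (i + 1) := by
          rw [List.set_eq_take_append_cons_drop, if_pos hil]
        have htl : (l.take i).length = i := by simp; omega
        have h1 : (l.take i).take (i + 1) = l.take i := List.take_of_length_le (by omega)
        rw [hset, List.take_append, h1, htl]
        have h2 : i + 1 - i = 1 := by omega
        have hnz : orig[k] ≠ (0 : Int) := by rw [← hvo]; exact hz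
        rw [h2, htk1, List.filter_append, htake, hvo]
        simp [hnz]
      · rw [List.drop_set, if_pos (by omega)]
        exact hdt

theorem fillZerosA_eq (ll n : Nat) : ∀ (i : Nat) (l : List Int), ll - i = n → i ≤ ll →
    l.length = ll → fillZerosA l i ll = l.take i ++ List.replicate (ll - i) 0 := by
  induction n with
  | zero =>
    intro i l hn hle hlen
    have : i = ll := by omega
    subst this
    rw [fillZerosA]
    simp [List.take_of_length_le (le_of_eq hlen)]
  | succ n ih =>
    intro i l hn hle hlen
    have hi : i < ll := by omega
    rw [fillZerosA, if_pos hi, ih (i + 1) (l.set i 0) (by omega) (by omega) (by simpa using hlen)]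
    have hset : l.set i 0 = l.take i ++ 0 :: l.drop (i + 1) := by
      rw [List.set_eq_take_append_cons_drop, if_pos (by omega)]
    have htl : (l.take i).length = i := by simp; omega
    rw [hset, List.take_append, htl]
    have h1 : (l.take i).take (i + 1) = l.take i := List.take_of_length_le (by omega)
    have h2 : i + 1 - i = 1 := by omega
    have h3 : ll - i = (ll - (i + 1)) + 1 := by omega
    rw [h1, h2, h3, List.replicate_succ]
    simp

theorem altLoop_eq (nums : List Int) (n : Nat) : ∀ (k : Nat), nums.length - k = n →
    altLoop nums nums.length k = nzMerge (nums.drop k) := by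
  induction n using Nat.strong_induction_on with
  | _ n ih =>
    intro k hk
    by_cases hlt : k < nums.length
    · have hdk := List.drop_eq_getElem_cons hlt
      have hgd : nums.getD k 0 = nums[k] := List.getD_eq_getElem nums 0 hlt
      rw [altLoop, if_pos hlt,
        ih (nums.length - (k + 1)) (by omega) (k + 1) rfl,
        ih (nums.length - (k + 2)) (by omega) (k + 2) rfl, hdk, hgd]
      by_cases hx : nums[k] = (0 : Int)
      · rw [if_pos hx, hx, nzMerge_zero_cons]
      · rw [if_neg hx]
        by_cases hm : k + 1 < nums.length ∧ nums.getD (k + 1) 0 = nums[k]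
        · rw [if_pos hm]
          obtain ⟨h1, h2⟩ := hm
          have hdk1 := List.drop_eq_getElem_cons h1
          have hy : nums[k + 1] = nums[k] := by
            rw [← List.getD_eq_getElem nums 0 h1, h2]
          rw [hdk1]
          simp [nzMerge, hx, hy]
        · rw [if_neg hm]
          by_cases h1 : k + 1 < nums.length
          · have h2 : nums.getD (k + 1) 0 ≠ nums[k] := fun he => hm ⟨h1, he⟩
            have hdk1 := List.drop_eq_getElem_cons h1
            have hy : nums[k + 1] ≠ nums[k] := by
              rw [← List.getD_eq_getElem nums 0 h1]; exact h2
            rw [hdk1]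
            simp [nzMerge, hx, hy]
          · have hnil : nums.drop (k + 1) = [] := List.drop_eq_nil_of_le (by omega)
            rw [hnil]
            simp [nzMerge, hx]
    · rw [altLoop, if_neg hlt, List.drop_eq_nil_of_le (by omega)]
      simp [nzMerge]

theorem writeback_eq (res2 : List Int) (m : Nat) : ∀ (k : Nat) (l : List Int),
    l.length = res2.length → k + m = res2.length →
    (List.range' k m).foldl (fun l idx => l.set idx (res2.getD idx 0)) l =
      l.take k ++ res2.drop k := by
  induction m with
  | zero =>
    intro k l hlen hk
    have h1 : List.take k l = l := List.take_of_length_le (by omega)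
    have h2 : List.drop k res2 = [] := List.drop_eq_nil_of_le (by omega)
    simp [h1, h2]
  | succ m ih =>
    intro k l hlen hk
    have hklt : k < res2.length := by omega
    rw [List.range'_succ, List.foldl_cons,
      ih (k + 1) (l.set k (res2.getD k 0)) (by simpa using hlen) (by omega)]
    have hset : l.set k (res2.getD k 0) = l.take k ++ res2.getD k 0 :: l.drop (k + 1) := by
      rw [List.set_eq_take_append_cons_drop, if_pos (by omega)]
    have htl : (l.take k).length = k := by simp; omega
    have h1 : (l.take k).take (k + 1) = l.take k := List.take_of_length_le (by omega)
    rw [hset, List.take_append, h1, htl]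
    have h2 : k + 1 - k = 1 := by omega
    have hd : res2.drop k = res2.getD k 0 :: res2.drop (k + 1) := by
      rw [List.drop_eq_getElem_cons hklt, List.getD_eq_getElem res2 0 hklt]
    rw [h2, hd]
    simp

theorem ease_array_eq (nums : List Int) :
    ease_array nums = nzMerge nums ++ List.replicate (nums.length - (nzMerge nums).length) 0 := by
  have hA : ease_array nums = fillZerosA
      ((List.range' 0 nums.length).foldl step2
        ((List.range' 0 (nums.length - 1)).foldl step1 nums, 0, 0)).1
      ((List.range' 0 nums.length).foldl step2
        ((List.range' 0 (nums.length - 1)).foldl step1 nums, 0, 0)).2.1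
      nums.length := by
    unfold ease_array step1 step2
    simp only [List.range_eq_range']
  have h1 : (List.range' 0 (nums.length - 1)).foldl step1 nums = specA nums := by
    simpa using pass1_eq nums []
  have hlenA : (specA nums).length = nums.length := specA_length nums
  obtain ⟨hL, hI, hT⟩ := pass2_inv (specA nums) nums.length 0 (specA nums) 0
    (by omega) rfl (by omega) (by simp) rfl
  rw [hA, h1]
  have hfill := fillZerosA_eq nums.length
    (nums.length - ((List.range' 0 nums.length).foldl step2 (specA nums, 0, 0)).2.1)
    (((List.range' 0 nums.length).foldl step2 (specA nums, 0, 0)).2.1)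
    (((List.range' 0 nums.length).foldl step2 (specA nums, 0, 0)).1)
    rfl (by omega) (by rw [hL, hlenA])
  rw [hfill, hT, filter_specA]
  have hlen2 : ((List.range' 0 nums.length).foldl step2 (specA nums, 0, 0)).2.1
      = (nzMerge nums).length := by
    have h4 : ((((List.range' 0 nums.length).foldl step2 (specA nums, 0, 0)).1.take
        (((List.range' 0 nums.length).foldl step2 (specA nums, 0, 0)).2.1))).length
        = ((List.range' 0 nums.length).foldl step2 (specA nums, 0, 0)).2.1 := by
      rw [List.length_take, hL, hlenA]
      omega
    rw [hT, filter_specA] at h4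
    omega
  rw [hlen2]

theorem ease_array_alt_eq (nums : List Int) :
    ease_array_alt nums = nzMerge nums ++ List.replicate (nums.length - (nzMerge nums).length) 0 := by
  have hres : altLoop nums nums.length 0 = nzMerge nums := by
    simpa using altLoop_eq nums (nums.length - 0) 0 rfl
  have hlen : (nzMerge nums).length ≤ nums.length := nzMerge_length_le nums
  have hB : ease_array_alt nums = (List.range' 0 nums.length).foldl
      (fun l idx => l.set idx ((nzMerge nums ++
        List.replicate (nums.length - (nzMerge nums).length) 0).getD idx 0)) nums := by
    unfold ease_array_alt
    simp only [List.range_eq_range', hres]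
  have hres2len : nums.length = (nzMerge nums ++
      List.replicate (nums.length - (nzMerge nums).length) 0).length := by
    simp
    omega
  rw [hB, writeback_eq _ nums.length 0 nums hres2len (by omega)]
  simp

-- ===== VERDICT (by name: the statement is the Claim_ definition above) =====
theorem ease_array_spec : Claim_equal_ease_array := by
  intro nums _
  unfold Spec_ease_array
  rw [ease_array_eq, ease_array_alt_eq]
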